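-- pv_equiv track=rewrite | github.com/rahulsamant37/Daily-Task | Python/python_question_34.py | findLargestDivisibleNumber
-- ===== SOURCE A (Python) =====
-- def findLargestDivisibleNumber(num):
--     # Base case: If the number is 1, return 1
--     if num == 1:
--         return 1
--
--     # Create a list to store the result
--     result = []
--
--     # Iterate from 2 to num
--     for i in range(2, num + 1):
--         # If the number is divisible by i, append i * (num // i) to the result list
--         if num % i == 0:
--             result.append(i * (num // i))
--
--     # Return the maximum value from the result list
--     return max(result)
-- ===== SOURCE B (Python) =====
-- def findLargestDivisibleNumber(num):
--     # Every appended value i * (num // i) equals num when i divides num,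
--     # and i = num itself always qualifies, so the maximum is just num.
--     return num
-- ===== Notes on version B (the rewrite author's own statement) =====
-- stated objective: faster
-- what changed: Replaced the divisor loop and max() with the algebraic identity i*(num//i) = num for every divisor i, returning num directly.
-- outside the precondition, e.g. on findLargestDivisibleNumber(0): A raises ValueError, B returns 0
import Mathlib
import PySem

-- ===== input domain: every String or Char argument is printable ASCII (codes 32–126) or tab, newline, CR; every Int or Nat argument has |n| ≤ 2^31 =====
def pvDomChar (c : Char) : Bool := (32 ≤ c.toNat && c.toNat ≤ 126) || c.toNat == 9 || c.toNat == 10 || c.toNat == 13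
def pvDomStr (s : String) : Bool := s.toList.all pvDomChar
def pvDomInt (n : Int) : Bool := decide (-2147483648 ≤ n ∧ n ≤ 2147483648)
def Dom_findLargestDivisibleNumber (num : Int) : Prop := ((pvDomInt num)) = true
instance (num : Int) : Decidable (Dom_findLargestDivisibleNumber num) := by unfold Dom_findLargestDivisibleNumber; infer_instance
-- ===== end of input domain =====

-- B replaces A's divisor loop + max() with the identity i*(num//i) = num: return num directly (faster).


-- ===== PORT A =====
def findLargestDivisibleNumber (num : Int) : Int :=
  if num = 1 then 1
  else
    let result := (PySem.List.pyRange 2 (num + 1) 1).foldl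
      (fun acc i => if PySem.Int.mod num i = 0 then acc ++ [i * PySem.Int.floordiv num i] else acc) []
    (PySem.List.max? result (fun x => x)).getD 0   -- none (max() of empty, ValueError) excluded by Pre_

-- ===== PORT B =====
def findLargestDivisibleNumber_alt (num : Int) : Int := num

-- ===== PRECONDITION & SPEC =====
-- Pre_ excludes num ≤ 0, where A's result list is empty and max([]) raises ValueError.
def Pre_findLargestDivisibleNumber (num : Int) : Prop := 1 ≤ num
instance (num : Int) : Decidable (Pre_findLargestDivisibleNumber num) := by unfold Pre_findLargestDivisibleNumber; infer_instance
def pvWitness_findLargestDivisibleNumber : Int := 3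

def Spec_findLargestDivisibleNumber (num : Int) (out : Int) : Prop := out = findLargestDivisibleNumber_alt num
instance (num : Int) (out : Int) : Decidable (Spec_findLargestDivisibleNumber num out) := by unfold Spec_findLargestDivisibleNumber; infer_instance

-- ===== CLAIM (what is proved, stated in full; the proofs are below) =====
def Claim_equal_findLargestDivisibleNumber : Prop := ∀ (num : Int), Dom_findLargestDivisibleNumber num → Pre_findLargestDivisibleNumber num → Spec_findLargestDivisibleNumber num (findLargestDivisibleNumber num)

-- ===== LEMMAS AND PROOFS =====

-- max?(l, identity) of a nonempty constant list is that constant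
lemma max?_const (l : List Int) (v : Int) (hne : l ≠ []) (hall : ∀ x ∈ l, x = v) :
    PySem.List.max? l (fun x => x) = some v := by
  cases hm : PySem.List.max? l (fun x => x) with
  | none => exact absurd ((PySem.List.max?_eq_none_iff _ _).mp hm) hne
  | some m => exact congrArg some (hall m (PySem.List.max?_mem hm))

-- ===== VERDICT (by name: the statement is the Claim_ definition above) =====
theorem findLargestDivisibleNumber_spec : Claim_equal_findLargestDivisibleNumber := by
  intro num _ hpre
  unfold Spec_findLargestDivisibleNumber findLargestDivisibleNumber findLargestDivisibleNumber_alt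
  by_cases h1 : num = 1
  · simp [h1]
  · have h2 : 2 ≤ num := by unfold Pre_findLargestDivisibleNumber at hpre; omega
    simp only [if_neg h1]
    rw [PySem.List.foldl_append_ite]
    rw [max?_const _ num ?_ ?_]
    · rfl
    · -- nonempty: num itself is in the filtered range
      have hmem : num ∈ (PySem.List.pyRange 2 (num + 1) 1).filter
          (fun i => decide (PySem.Int.mod num i = 0)) := by
        rw [List.mem_filter]
        refine ⟨(PySem.List.mem_pyRange_one).mpr ⟨h2, by omega⟩, ?_⟩
        simp [(PySem.Int.mod_eq_zero_iff_dvd num num).mpr dvd_rfl]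
      simp only [ne_eq, List.map_eq_nil_iff, List.nil_append]
      intro hnil
      rw [hnil] at hmem; exact (List.not_mem_nil hmem)
    · intro x hx
      simp only [List.nil_append, List.mem_map, List.mem_filter, decide_eq_true_eq] at hx
      obtain ⟨i, ⟨_, hmod⟩, hfx⟩ := hx
      have := PySem.Int.floordiv_mul_add_mod num i
      rw [hmod] at this
      rw [← hfx, mul_comm]
      omega
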